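-- pv_equiv track=rewrite | github.com/viktor-ferenczi/se2-dev-skills | skills/se2-dev-mod/search_mods.py | compress_namespace_hierarchy
-- ===== SOURCE A (Python) =====
-- from collections import defaultdict
--
-- def compress_namespace_hierarchy(fqn_list):
--     """Group types by their full namespace path and format with single-level nesting."""
--     if not fqn_list:
--         return []
--
--     namespace_groups = defaultdict(list)
--
--     for fqn in fqn_list:
--         if "." in fqn:
--             namespace, type_name = fqn.rsplit(".", 1)
--             namespace_groups[namespace].append(type_name)
--         else:
--             namespace_groups[""].append(fqn)
--
--     results = []
--     for namespace in sorted(namespace_groups.keys()):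
--         types = sorted(namespace_groups[namespace])
--
--         if len(types) == 1:
--             if namespace:
--                 results.append(f"{namespace}.{types[0]}")
--             else:
--                 results.append(types[0])
--         else:
--             types_str = ",".join(types)
--             if namespace:
--                 results.append(f"{namespace}.({types_str})")
--             else:
--                 results.append(f"({types_str})")
--
--     return results
-- ===== SOURCE B (Python) =====
-- from itertools import groupby
-- from operator import itemgetter
--
--
-- def compress_namespace_hierarchy(fqn_list):
--     """Group types by their full namespace path and format with single-level nesting."""
--     if not fqn_list:
--         return []
--     pairs = sorted(
--         tuple(fqn.rsplit(".", 1)) if "." in fqn else ("", fqn)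
--         for fqn in fqn_list
--     )
--     results = []
--     for namespace, group in groupby(pairs, key=itemgetter(0)):
--         types = [t for _, t in group]
--         body = types[0] if len(types) == 1 else "(" + ",".join(types) + ")"
--         results.append(namespace + "." + body if namespace else body)
--     return results
-- ===== Notes on version B (the rewrite author's own statement) =====
-- stated objective: idiomatic
-- what changed: Replaces the defaultdict grouping plus per-namespace sorting with one split pass, a single sort of (namespace, type) tuples, and an itertools.groupby walk over the sorted pairs.
import Mathlib
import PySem

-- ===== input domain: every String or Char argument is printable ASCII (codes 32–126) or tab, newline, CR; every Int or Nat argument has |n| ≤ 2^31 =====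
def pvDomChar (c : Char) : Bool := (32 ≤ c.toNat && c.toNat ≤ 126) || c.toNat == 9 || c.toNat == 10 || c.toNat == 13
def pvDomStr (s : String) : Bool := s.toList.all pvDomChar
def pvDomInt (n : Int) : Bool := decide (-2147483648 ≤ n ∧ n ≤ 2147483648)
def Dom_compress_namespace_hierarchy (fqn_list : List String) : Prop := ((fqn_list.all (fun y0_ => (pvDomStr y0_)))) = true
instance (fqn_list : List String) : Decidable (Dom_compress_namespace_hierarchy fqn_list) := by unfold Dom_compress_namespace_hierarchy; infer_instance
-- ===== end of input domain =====

-- B replaces A's defaultdict grouping + per-namespace sorts by one sort of (namespace, type)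
-- pairs followed by a groupby-style walk over the sorted pairs (objective: idiomatic).

-- ===== PORT A =====

-- fqn.rsplit(".", 1) for a string known to contain '.' (exact: splits at the LAST '.')
def splitDot (fqn : String) : String × String :=
  let cs := fqn.toList
  let k := cs.reverse.idxOf '.'
  (String.ofList (cs.take (cs.length - k - 1)), String.ofList ((cs.reverse.take k).reverse))

-- A's first loop: namespace_groups = defaultdict(list); append type names per namespace
def aGroups (fqn_list : List String) : PySem.Dict String (List String) :=
  fqn_list.foldl (fun d fqn =>
    if fqn.toList.contains '.' then
      let p := splitDot fqn
      d.modify p.1 [] (fun l => l ++ [p.2])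
    else
      d.modify "" [] (fun l => l ++ [fqn])) PySem.Dict.empty

-- A's second loop: for namespace in sorted(keys): format the sorted type list
def aEmit (d : PySem.Dict String (List String)) : List String :=
  (PySem.List.sorted d.keys (fun x => x)).foldl (fun results ns =>
    let types := PySem.List.sorted (d.getD ns []) (fun x => x)
    if types.length = 1 then
      if ns ≠ "" then results ++ [ns ++ "." ++ types.headD ""]
      else results ++ [types.headD ""]
    else
      if ns ≠ "" then results ++ [ns ++ "." ++ ("(" ++ PySem.Str.join "," types ++ ")")]
      else results ++ ["(" ++ PySem.Str.join "," types ++ ")"]) []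

def compress_namespace_hierarchy (fqn_list : List String) : List String :=
  if fqn_list = [] then []
  else aEmit (aGroups fqn_list)

-- ===== PORT B =====

-- the one split pass: (namespace, type_name) pairs, namespace '' when no dot
def bPairs (fqn_list : List String) : List (String × String) :=
  fqn_list.map (fun fqn => if fqn.toList.contains '.' then splitDot fqn else ("", fqn))

-- itertools.groupby over the pairs: maximal runs of equal first component, with the types collected
def groupRuns : List (String × String) → List (String × List String)
  | [] => []
  | (ns, ty) :: rest =>
      (ns, ty :: (rest.takeWhile (fun p => p.1 == ns)).map (fun p => p.2))
        :: groupRuns (rest.dropWhile (fun p => p.1 == ns))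
  termination_by xs => xs.length
  decreasing_by
    simp only [List.length_cons]
    exact Nat.lt_succ_of_le (List.length_dropWhile_le _ _)

-- B's loop: format each group
def bEmit (gs : List (String × List String)) : List String :=
  gs.foldl (fun results g =>
    let body := if g.2.length = 1 then g.2.headD ""
                else "(" ++ PySem.Str.join "," g.2 ++ ")"
    results ++ [if g.1 ≠ "" then g.1 ++ "." ++ body else body]) []

def compress_namespace_hierarchy_alt (fqn_list : List String) : List String :=
  if fqn_list = [] then []
  else bEmit (groupRuns (PySem.List.sorted2 (bPairs fqn_list) (fun p => p.1) (fun p => p.2)))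

-- ===== PRECONDITION & SPEC =====
def Spec_compress_namespace_hierarchy (fqn_list : List String) (out : List String) : Prop := out = compress_namespace_hierarchy_alt fqn_list
instance (fqn_list : List String) (out : List String) : Decidable (Spec_compress_namespace_hierarchy fqn_list out) := by unfold Spec_compress_namespace_hierarchy; infer_instance

-- ===== CLAIM (what is proved, stated in full; the proofs are below) =====
def Claim_equal_compress_namespace_hierarchy : Prop := ∀ (fqn_list : List String), Dom_compress_namespace_hierarchy fqn_list → Spec_compress_namespace_hierarchy fqn_list (compress_namespace_hierarchy fqn_list)

-- ===== LEMMAS AND PROOFS =====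

-- proof-only abbreviations
def pairOf (fqn : String) : String × String :=
  if fqn.toList.contains '.' then splitDot fqn else ("", fqn)

def grpP (pairs : List (String × String)) (ns : String) : List (String × String) :=
  pairs.filter (fun p => p.1 == ns)

def ksOf (pairs : List (String × String)) : List String :=
  PySem.List.sorted (PySem.List.dedup (pairs.map (fun p => p.1))) (fun x => x)

def blk (pairs : List (String × String)) (ns : String) : List (String × String) :=
  PySem.List.sorted (grpP pairs ns) (fun p => p.2)

def fmtA (ns : String) (types : List String) : String :=
  if types.length = 1 then
    if ns ≠ "" then ns ++ "." ++ types.headD "" else types.headD ""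
  else
    if ns ≠ "" then ns ++ "." ++ ("(" ++ PySem.Str.join "," types ++ ")")
    else "(" ++ PySem.Str.join "," types ++ ")"

theorem aGroups_eq (l : List String) :
    aGroups l = (l.map pairOf).foldl
      (fun d p => d.modify p.1 [] (fun cur => cur ++ [p.2])) PySem.Dict.empty := by
  have hf : (fun (d : PySem.Dict String (List String)) fqn =>
      if fqn.toList.contains '.' then
        let p := splitDot fqn
        d.modify p.1 [] (fun l => l ++ [p.2])
      else
        d.modify "" [] (fun l => l ++ [fqn])) =
      (fun d fqn => d.modify (pairOf fqn).1 [] (fun cur => cur ++ [(pairOf fqn).2])) := by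
    funext d fqn
    simp only [pairOf]
    split <;> rfl
  rw [aGroups, hf]
  exact (List.foldl_map (f := pairOf)
    (g := fun (d : PySem.Dict String (List String)) p => d.modify p.1 [] fun cur => cur ++ [p.2])).symm

theorem aGroups_keys (l : List String) :
    (aGroups l).keys = PySem.List.dedup ((l.map pairOf).map (fun p => p.1)) := by
  rw [aGroups_eq, PySem.Dict.keys_foldl_modify_key ((l.map pairOf)) (fun p => p.1) []
    (fun _ p => fun cur => cur ++ [p.2]) PySem.Dict.empty]
  rw [PySem.Dict.keys_empty, PySem.List.dedup_eq_ofList]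
  rw [PySem.Set.update_eq_append_filter]
  simp [PySem.Set.contains]

theorem aGroups_getD (l : List String) (ns : String) :
    (aGroups l).getD ns [] = (grpP (l.map pairOf) ns).map (fun p => p.2) := by
  rw [aGroups_eq, PySem.Dict.getD_foldl_modify_append, PySem.Dict.getD_empty, grpP]
  simp

theorem aEmit_eq (d : PySem.Dict String (List String)) :
    aEmit d = (PySem.List.sorted d.keys (fun x => x)).map
      (fun ns => fmtA ns (PySem.List.sorted (d.getD ns []) (fun x => x))) := by
  have hg : (fun (results : List String) ns =>
      let types := PySem.List.sorted (d.getD ns []) (fun x => x)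
      if types.length = 1 then
        if ns ≠ "" then results ++ [ns ++ "." ++ types.headD ""]
        else results ++ [types.headD ""]
      else
        if ns ≠ "" then results ++ [ns ++ "." ++ ("(" ++ PySem.Str.join "," types ++ ")")]
        else results ++ ["(" ++ PySem.Str.join "," types ++ ")"]) =
      (fun results ns =>
        results ++ [fmtA ns (PySem.List.sorted (d.getD ns []) (fun x => x))]) := by
    funext results ns
    simp only [fmtA]
    split <;> split <;> rfl
  rw [aEmit, hg, PySem.List.foldl_append_singleton_eq_map]
  simp

-- L1: A in normal form
theorem A_normal (l : List String) (h : l ≠ []) :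
    compress_namespace_hierarchy l =
      (ksOf (l.map pairOf)).map (fun ns =>
        fmtA ns (PySem.List.sorted ((grpP (l.map pairOf) ns).map (fun p => p.2)) (fun x => x))) := by
  rw [compress_namespace_hierarchy, if_neg h, aEmit_eq, aGroups_keys, ksOf]
  apply List.map_congr_left
  intro ns _
  rw [aGroups_getD]

-- generic: insertion keeps the list pairwise-sorted
theorem pairwise_insertBy {α κ : Type} [LinearOrder κ] (key : α → κ) (x : α) (acc : List α)
    (h : acc.Pairwise (fun a b => key a ≤ key b)) :
    (PySem.List.insertBy (fun a b => decide (key a < key b)) x acc).Pairwise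
      (fun a b => key a ≤ key b) := by
  induction acc with
  | nil => simp [PySem.List.insertBy]
  | cons y ys ih =>
    rcases List.pairwise_cons.mp h with ⟨hy, hys⟩
    by_cases hb : key x < key y
    · rw [PySem.List.insertBy, if_pos (by simpa using hb)]
      refine List.pairwise_cons.mpr ⟨?_, h⟩
      intro z hz
      rcases List.mem_cons.mp hz with rfl | hz
      · exact le_of_lt hb
      · exact le_trans (le_of_lt hb) (hy z hz)
    · rw [PySem.List.insertBy, if_neg (by simpa using hb)]
      refine List.pairwise_cons.mpr ⟨?_, ih hys⟩
      intro z hz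
      rcases (PySem.List.mem_insertBy _ _ _ _).mp hz with rfl | hz
      · exact not_lt.mp hb
      · exact hy z hz

theorem pairwise_foldl_insertBy {α κ : Type} [LinearOrder κ] (key : α → κ) (l : List α)
    (acc : List α) (h : acc.Pairwise (fun a b => key a ≤ key b)) :
    (l.foldl (fun acc x => PySem.List.insertBy (fun a b => decide (key a < key b)) x acc) acc).Pairwise
      (fun a b => key a ≤ key b) := by
  induction l generalizing acc with
  | nil => exact h
  | cons x xs ih => exact ih _ (pairwise_insertBy key x acc h)

-- sorted2 with fst/snd keys is insertion sort by the lexicographic key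
theorem sorted2_eq_foldl_lex (P : List (String × String)) :
    PySem.List.sorted2 P (fun p => p.1) (fun p => p.2) =
      P.foldl (fun acc x =>
        PySem.List.insertBy (fun a b =>
          decide ((toLex a : Lex (String × String)) < toLex b)) x acc) [] := by
  have hbe : (fun (a b : String × String) =>
      decide (a.1 < b.1) || (!decide (b.1 < a.1) && decide (a.2 < b.2))) =
      (fun a b => decide ((toLex a : Lex (String × String)) < toLex b)) := by
    funext a b
    rcases lt_trichotomy a.1 b.1 with h | h | h
    · simp [h, Prod.Lex.toLex_lt_toLex, asymm h]
    · simp [h, Prod.Lex.toLex_lt_toLex]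
    · have h1 : ¬ a.1 < b.1 := asymm h
      have h2 : a.1 ≠ b.1 := ne_of_gt h
      simp [Prod.Lex.toLex_lt_toLex, h, h1, h2]
  have h0 : PySem.List.sorted2 P (fun p => p.1) (fun p => p.2) =
      P.foldl (fun acc x => PySem.List.insertBy (fun a b =>
        decide (a.1 < b.1) || (!decide (b.1 < a.1) && decide (a.2 < b.2))) x acc) [] := rfl
  rw [h0, hbe]

theorem sorted2_pairwise_lex (P : List (String × String)) :
    (PySem.List.sorted2 P (fun p => p.1) (fun p => p.2)).Pairwise
      (fun a b => (toLex a : Lex (String × String)) ≤ toLex b) := by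
  rw [sorted2_eq_foldl_lex]
  exact pairwise_foldl_insertBy (fun p => (toLex p : Lex (String × String))) P [] (by simp)

-- permutation: concatenating the filters over a covering nodup key list recovers the list
theorem perm_flatMap_filter {α κ : Type} [DecidableEq κ] (key : α → κ) :
    ∀ (ks : List κ) (l : List α), ks.Nodup → (∀ x ∈ l, key x ∈ ks) →
      (ks.flatMap (fun k => l.filter (fun x => decide (key x = k)))).Perm l := by
  intro ks
  induction ks with
  | nil =>
    intro l _ hcov
    have : l = [] := by
      cases l with
      | nil => rfl
      | cons a t => exact absurd (hcov a (by simp)) (by simp)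
    simp [this]
  | cons k ks ih =>
    intro l hnd hcov
    rcases List.nodup_cons.mp hnd with ⟨hk, hnd'⟩
    have hstep : ∀ k' ∈ ks, l.filter (fun x => decide (key x = k')) =
        (l.filter (fun x => !decide (key x = k))).filter (fun x => decide (key x = k')) := by
      intro k' hk'
      rw [List.filter_filter]
      apply List.filter_congr
      intro x _
      by_cases hx : key x = k'
      · have hkk : k' ≠ k := fun he => hk (he ▸ hk')
        simp [hx, hkk]
      · simp [hx]
    rw [List.flatMap_cons, List.flatMap_congr hstep]
    have hcov' : ∀ x ∈ l.filter (fun x => !decide (key x = k)), key x ∈ ks := by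
      intro x hx
      rcases List.mem_filter.mp hx with ⟨hxl, hxk⟩
      rcases List.mem_cons.mp (hcov x hxl) with h | h
      · simp [h] at hxk
      · exact h
    exact (List.Perm.append (List.Perm.refl _)
      (ih _ hnd' hcov')).trans (List.filter_append_perm _ l)

theorem ksOf_pairwise_lt (P : List (String × String)) : (ksOf P).Pairwise (· < ·) := by
  rw [ksOf, PySem.List.dedup_eq_ofList]
  exact PySem.List.sorted_ofList_pairwise_lt _

theorem ksOf_nodup (P : List (String × String)) : (ksOf P).Nodup :=
  (ksOf_pairwise_lt P).imp ne_of_lt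

theorem mem_ksOf (P : List (String × String)) (p : String × String) (hp : p ∈ P) :
    p.1 ∈ ksOf P := by
  rw [ksOf, PySem.List.mem_sorted, PySem.List.mem_dedup]
  exact List.mem_map_of_mem hp

theorem blk_fst (P : List (String × String)) (ns : String) :
    ∀ p ∈ blk P ns, p.1 = ns := by
  intro p hp
  rw [blk, PySem.List.mem_sorted] at hp
  have := (List.mem_filter.mp hp).2
  simpa using this

theorem blk_ne_nil (P : List (String × String)) (ns : String) (h : ns ∈ ksOf P) :
    blk P ns ≠ [] := by
  rw [ksOf, PySem.List.mem_sorted, PySem.List.mem_dedup] at h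
  rcases List.mem_map.mp h with ⟨p, hp, rfl⟩
  intro hnil
  rw [blk, PySem.List.sorted_eq_nil_iff] at hnil
  have : p ∈ grpP P p.1 := List.mem_filter.mpr ⟨hp, by simp⟩
  rw [hnil] at this
  exact absurd this (List.not_mem_nil)

theorem perm_flatMap_blk (P : List (String × String)) :
    ((ksOf P).flatMap (blk P)).Perm P := by
  have h1 : ∀ ks : List String, (ks.flatMap (blk P)).Perm (ks.flatMap (grpP P)) := by
    intro ks
    induction ks with
    | nil => simp
    | cons k ks ih =>
      rw [List.flatMap_cons, List.flatMap_cons]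
      exact List.Perm.append (PySem.List.sorted_perm _ _ _) ih
  have h2 : (ksOf P).flatMap (grpP P) =
      (ksOf P).flatMap (fun k => P.filter (fun x => decide (x.1 = k))) := by
    apply List.flatMap_congr
    intro k _
    rw [grpP]
    apply List.filter_congr
    intro x _
    rw [Bool.eq_iff_iff]
    simp
  refine (h1 (ksOf P)).trans ?_
  rw [h2]
  exact perm_flatMap_filter (fun p => p.1) (ksOf P) P (ksOf_nodup P)
    (fun x hx => mem_ksOf P x hx)

theorem pairwise_flatMap_blocks (bs : String → List (String × String)) :
    ∀ ks : List String, ks.Pairwise (· < ·) →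
      (∀ ns ∈ ks, (∀ p ∈ bs ns, p.1 = ns) ∧ (bs ns).Pairwise (fun a b => a.2 ≤ b.2)) →
      (ks.flatMap bs).Pairwise (fun a b => (toLex a : Lex (String × String)) ≤ toLex b) := by
  intro ks
  induction ks with
  | nil => simp
  | cons k ks ih =>
    intro hpw hbs
    rcases List.pairwise_cons.mp hpw with ⟨hk, hpw'⟩
    rw [List.flatMap_cons, List.pairwise_append]
    refine ⟨?_, ih hpw' (fun ns hns => hbs ns (List.mem_cons_of_mem _ hns)), ?_⟩
    · rcases hbs k (List.mem_cons_self) with ⟨hfst, hsnd⟩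
      refine hsnd.imp_of_mem ?_
      intro a b ha hb hab
      rw [Prod.Lex.toLex_le_toLex]
      exact Or.inr ⟨(hfst a ha).trans (hfst b hb).symm, hab⟩
    · intro a ha b hb
      rcases List.mem_flatMap.mp hb with ⟨ns, hns, hbns⟩
      rcases hbs k (List.mem_cons_self) with ⟨hfst, _⟩
      rcases hbs ns (List.mem_cons_of_mem _ hns) with ⟨hfst', _⟩
      rw [Prod.Lex.toLex_le_toLex]
      exact Or.inl (by rw [hfst a ha, hfst' b hbns]; exact hk ns hns)

theorem pairwise_flatMap_lex (P : List (String × String)) :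
    ((ksOf P).flatMap (blk P)).Pairwise
      (fun a b => (toLex a : Lex (String × String)) ≤ toLex b) := by
  apply pairwise_flatMap_blocks (blk P) (ksOf P) (ksOf_pairwise_lt P)
  intro ns _
  refine ⟨blk_fst P ns, ?_⟩
  exact PySem.List.sorted_pairwise (grpP P ns) (fun p => p.2)

-- L3: the single sorted pass equals the concatenation of per-namespace sorted blocks
theorem sorted2_eq_flatMap (P : List (String × String)) :
    PySem.List.sorted2 P (fun p => p.1) (fun p => p.2) = (ksOf P).flatMap (blk P) := by
  apply PySem.List.eq_of_perm_of_pairwise_le_of_injective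
    (key := fun p => (toLex p : Lex (String × String)))
  · exact fun a b h => toLex.injective h
  · exact (PySem.List.sorted2_perm P _ _ _).trans (perm_flatMap_blk P).symm
  · exact sorted2_pairwise_lex P
  · exact pairwise_flatMap_lex P

-- takeWhile / dropWhile over an all-true ++ all-false concatenation
theorem takeWhile_tf {α : Type} (q : α → Bool) :
    ∀ (xs ys : List α), (∀ x ∈ xs, q x = true) → (∀ y ∈ ys, q y = false) →
      (xs ++ ys).takeWhile q = xs := by
  intro xs
  induction xs with
  | nil =>
    intro ys _ hys
    cases ys with
    | nil => rfl
    | cons y t => simp [hys y (by simp)]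
  | cons x xs ih =>
    intro ys hxs hys
    simp only [List.cons_append, List.takeWhile_cons, hxs x (by simp), if_true]
    rw [ih ys (fun z hz => hxs z (by simp [hz])) hys]

theorem dropWhile_tf {α : Type} (q : α → Bool) :
    ∀ (xs ys : List α), (∀ x ∈ xs, q x = true) → (∀ y ∈ ys, q y = false) →
      (xs ++ ys).dropWhile q = ys := by
  intro xs
  induction xs with
  | nil =>
    intro ys _ hys
    cases ys with
    | nil => rfl
    | cons y t => simp [hys y (by simp)]
  | cons x xs ih =>
    intro ys hxs hys
    simp only [List.cons_append, List.dropWhile_cons, hxs x (by simp), if_true]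
    exact ih ys (fun z hz => hxs z (by simp [hz])) hys

-- L4: groupRuns of a block concatenation with strictly increasing keys
theorem groupRuns_flatMap (bs : String → List (String × String)) :
    ∀ ks : List String, ks.Pairwise (· < ·) →
      (∀ ns ∈ ks, bs ns ≠ [] ∧ ∀ p ∈ bs ns, p.1 = ns) →
      groupRuns (ks.flatMap bs) = ks.map (fun ns => (ns, (bs ns).map (fun p => p.2))) := by
  intro ks
  induction ks with
  | nil => intro _ _; simp [groupRuns]
  | cons k ks ih =>
    intro hpw hbs
    rcases List.pairwise_cons.mp hpw with ⟨hklt, hpw'⟩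
    rcases hbs k (List.mem_cons_self) with ⟨hne, hfst⟩
    obtain ⟨⟨ns, ty⟩, more, hbk⟩ : ∃ p more, bs k = p :: more := by
      cases h : bs k with
      | nil => exact absurd h hne
      | cons p more => exact ⟨p, more, rfl⟩
    have hns : ns = k := hfst (ns, ty) (by rw [hbk]; simp)
    subst hns
    have hmore : ∀ x ∈ more, (fun (p : String × String) => p.1 == ns) x = true := by
      intro x hx
      have : x.1 = ns := hfst x (by rw [hbk]; exact List.mem_cons_of_mem _ hx)
      simp [this]
    have hrest : ∀ y ∈ ks.flatMap bs, (fun (p : String × String) => p.1 == ns) y = false := by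
      intro y hy
      rcases List.mem_flatMap.mp hy with ⟨ns', hns', hyb⟩
      have h1 : y.1 = ns' := (hbs ns' (List.mem_cons_of_mem _ hns')).2 y hyb
      have h2 : ns < ns' := hklt ns' hns'
      simp [h1]
      exact (ne_of_gt h2)
    rw [List.flatMap_cons, hbk, List.cons_append, groupRuns,
      takeWhile_tf _ more (ks.flatMap bs) hmore hrest,
      dropWhile_tf _ more (ks.flatMap bs) hmore hrest,
      ih hpw' (fun n hn => hbs n (List.mem_cons_of_mem _ hn)), List.map_cons, hbk]
    simp

-- L2: sorting by snd commutes with projecting snd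
theorem map_snd_insertBy (x : String × String) (ys : List (String × String)) :
    (PySem.List.insertBy (fun a b => decide (a.2 < b.2)) x ys).map (fun p => p.2) =
      PySem.List.insertBy (fun a b => decide (a < b)) x.2 (ys.map (fun p => p.2)) := by
  induction ys with
  | nil => simp [PySem.List.insertBy]
  | cons y ys ih =>
    by_cases h : x.2 < y.2
    · rw [PySem.List.insertBy, if_pos (by simpa using h), List.map_cons, List.map_cons,
        PySem.List.insertBy, if_pos (by simpa using h)]
    · rw [PySem.List.insertBy, if_neg (by simpa using h), List.map_cons, List.map_cons,
        PySem.List.insertBy, if_neg (by simpa using h), ih]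

theorem map_snd_foldl_insertBy (l : List (String × String)) :
    ∀ acc : List (String × String),
      (l.foldl (fun acc x => PySem.List.insertBy (fun a b => decide (a.2 < b.2)) x acc) acc).map
          (fun p => p.2) =
        (l.map (fun p => p.2)).foldl
          (fun acc x => PySem.List.insertBy (fun a b => decide (a < b)) x acc)
          (acc.map (fun p => p.2)) := by
  induction l with
  | nil => intro acc; rfl
  | cons x xs ih =>
    intro acc
    rw [List.foldl_cons, List.map_cons, List.foldl_cons, ih, map_snd_insertBy]

theorem map_snd_sorted (l : List (String × String)) :
    (PySem.List.sorted l (fun p => p.2)).map (fun p => p.2) =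
      PySem.List.sorted (l.map (fun p => p.2)) (fun x => x) := by
  rw [PySem.List.sorted_eq_foldl_insertBy, PySem.List.sorted_eq_foldl_insertBy,
    map_snd_foldl_insertBy]
  rfl

-- B's emit loop as a map
theorem bEmit_eq (gs : List (String × List String)) :
    bEmit gs = gs.map (fun g => fmtA g.1 g.2) := by
  have hg : (fun (results : List String) (g : String × List String) =>
      let body := if g.2.length = 1 then g.2.headD ""
                  else "(" ++ PySem.Str.join "," g.2 ++ ")"
      results ++ [if g.1 ≠ "" then g.1 ++ "." ++ body else body]) =
      (fun results g => results ++ [fmtA g.1 g.2]) := by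
    funext results g
    simp only [fmtA]
    split <;> split <;> rfl
  rw [bEmit, hg, PySem.List.foldl_append_singleton_eq_map]
  simp

-- ===== VERDICT (by name: the statement is the Claim_ definition above) =====
theorem compress_namespace_hierarchy_spec : Claim_equal_compress_namespace_hierarchy := by
  intro l _
  unfold Spec_compress_namespace_hierarchy
  by_cases h : l = []
  · rw [compress_namespace_hierarchy, compress_namespace_hierarchy_alt, if_pos h, if_pos h]
  · rw [A_normal l h, compress_namespace_hierarchy_alt, if_neg h]
    have hb : bPairs l = l.map pairOf := rfl
    rw [hb, sorted2_eq_flatMap,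
      groupRuns_flatMap (blk (l.map pairOf)) (ksOf (l.map pairOf))
        (ksOf_pairwise_lt _)
        (fun ns hns => ⟨blk_ne_nil _ ns hns, blk_fst _ ns⟩),
      bEmit_eq, List.map_map]
    apply List.map_congr_left
    intro ns _
    have : (blk (l.map pairOf) ns).map (fun p => p.2) =
        PySem.List.sorted ((grpP (l.map pairOf) ns).map (fun p => p.2)) (fun x => x) := by
      rw [blk, map_snd_sorted]
    simp only [Function.comp]
    rw [this]
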